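-- pv_equiv track=rewrite | github.com/himmelroman/tmunan | tmunan/display/utils.py | duplicate_frames
-- ===== SOURCE A (Python) =====
-- def duplicate_frames(frames, target_fps):
--     """Duplicates frames to achieve the target FPS.
--
--     Args:
--     blend: A list of blend.
--     target_fps: The target frames per second.
--
--     Returns:
--     A list of blend with the target FPS achieved by duplicating frames.
--     """
--
--     # No need to calculate total_frames_needed, it's the target FPS itself
--     total_frames_needed = target_fps
--
--     # If there are enough blend, return them directly.
--     if len(frames) >= total_frames_needed:
--         return frames
--
--     # Calculate how many times each image needs to be duplicated.
--     duplicates_per_image, remainder = divmod(total_frames_needed, len(frames))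
--
--     # Create the output list.
--     output_images = []
--
--     # Add each image the required number of times.
--     for img in frames:
--         for _ in range(duplicates_per_image):
--             output_images.append(img)
--
--     # Add the remaining blend
--     for _ in range(remainder):
--         output_images.append(frames[-1])
--
--     return output_images
-- ===== SOURCE B (Python) =====
-- def duplicate_frames(frames, target_fps):
--     """Duplicates frames to achieve the target FPS (position-driven rebuild)."""
--     if len(frames) >= target_fps:
--         return frames
--     duplicates_per_image = target_fps // len(frames)
--     return [frames[min(i // duplicates_per_image, len(frames) - 1)]
--             for i in range(target_fps)]
-- ===== Notes on version B (the rewrite author's own statement) =====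
-- stated objective: simpler
-- what changed: Replaced the nested duplicate-appending loops plus the remainder loop by a single position-driven comprehension: output position i maps to frames[min(i // duplicates_per_image, len(frames)-1)], covering the remainder via the min with the last index.
import Mathlib
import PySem

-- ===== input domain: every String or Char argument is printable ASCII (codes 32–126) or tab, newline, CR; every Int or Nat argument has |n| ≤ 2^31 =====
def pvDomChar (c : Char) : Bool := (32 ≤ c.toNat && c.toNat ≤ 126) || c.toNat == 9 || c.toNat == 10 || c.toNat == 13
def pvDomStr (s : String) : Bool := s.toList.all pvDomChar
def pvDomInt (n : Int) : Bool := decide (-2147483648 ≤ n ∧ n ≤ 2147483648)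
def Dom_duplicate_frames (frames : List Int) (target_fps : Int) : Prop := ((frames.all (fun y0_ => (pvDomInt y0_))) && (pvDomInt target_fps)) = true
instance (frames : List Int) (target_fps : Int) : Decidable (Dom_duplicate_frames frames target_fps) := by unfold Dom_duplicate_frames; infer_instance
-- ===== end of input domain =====

-- B rebuilds the output by a single position-driven comprehension instead of A's nested
-- duplicate-appending loops plus a remainder loop (objective: simpler).


-- ===== PORT A =====
def duplicate_frames (frames : List Int) (target_fps : Int) : List Int :=
  if (frames.length : Int) ≥ target_fps then frames
  else
    let duplicates_per_image := PySem.Int.floordiv target_fps (frames.length : Int)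
    let remainder := PySem.Int.mod target_fps (frames.length : Int)
    let output_images : List Int := []
    let output_images := frames.foldl (fun acc img =>
      (PySem.List.pyRange 0 duplicates_per_image 1).foldl (fun a _ => a ++ [img]) acc) output_images
    let output_images := (PySem.List.pyRange 0 remainder 1).foldl
      (fun a _ => a ++ [PySem.List.pyGetD frames (-1) 0]) output_images
    output_images

-- ===== PORT B =====
def duplicate_frames_alt (frames : List Int) (target_fps : Int) : List Int :=
  if (frames.length : Int) ≥ target_fps then frames
  else
    let duplicates_per_image := PySem.Int.floordiv target_fps (frames.length : Int)
    (PySem.List.pyRange 0 target_fps 1).map (fun i =>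
      PySem.List.pyGetD frames
        (min (PySem.Int.floordiv i duplicates_per_image) ((frames.length : Int) - 1)) 0)

-- ===== PRECONDITION & SPEC =====
-- Pre_ excludes exactly the inputs where Python A raises ZeroDivisionError:
-- frames = [] with target_fps > 0 (divmod by len(frames) = 0).  B raises there too.
def Pre_duplicate_frames (frames : List Int) (target_fps : Int) : Prop :=
  frames ≠ [] ∨ target_fps ≤ 0
instance (frames : List Int) (target_fps : Int) : Decidable (Pre_duplicate_frames frames target_fps) := by unfold Pre_duplicate_frames; infer_instance

def pvWitness_duplicate_frames : List Int × Int := ([1, 2], 5)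

def Spec_duplicate_frames (frames : List Int) (target_fps : Int) (out : List Int) : Prop := out = duplicate_frames_alt frames target_fps
instance (frames : List Int) (target_fps : Int) (out : List Int) : Decidable (Spec_duplicate_frames frames target_fps out) := by unfold Spec_duplicate_frames; infer_instance

-- ===== CLAIM (what is proved, stated in full; the proofs are below) =====
def Claim_equal_duplicate_frames : Prop := ∀ (frames : List Int) (target_fps : Int), Dom_duplicate_frames frames target_fps → Pre_duplicate_frames frames target_fps → Spec_duplicate_frames frames target_fps (duplicate_frames frames target_fps)

-- ===== LEMMAS AND PROOFS =====

-- The even blocks: positions 0 .. Q*n-1 read frame k/Q.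
lemma blocks_eq (Q : Nat) (l : List Int) :
    (List.range (Q * l.length)).map (fun k => l.getD (k / Q) 0)
      = l.flatMap (fun x => List.replicate Q x) := by
  induction l with
  | nil => simp
  | cons x xs ih =>
    have h : Q * (x :: xs).length = Q + Q * xs.length := by
      simp [List.length_cons, Nat.mul_succ, Nat.add_comm]
    rw [h, List.range_add, List.map_append, List.map_map]
    congr 1
    · have : ∀ k ∈ List.range Q, (x :: xs).getD (k / Q) 0 = x := by
        intro k hk
        rw [List.mem_range] at hk
        rw [Nat.div_eq_of_lt hk]
        rfl
      rw [List.map_congr_left this]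
      simp [List.map_const']
    · have : ∀ k ∈ List.range (Q * xs.length),
          ((fun k => (x :: xs).getD (k / Q) 0) ∘ (fun a => Q + a)) k
            = xs.getD (k / Q) 0 := by
        intro k hk
        have hQ : 0 < Q := by
          rcases Nat.eq_zero_or_pos Q with h0 | h0
          · simp [h0] at hk
          · exact h0
        simp only [Function.comp]
        rw [Nat.add_comm Q k, Nat.add_div_right _ hQ]
        rfl
      rw [List.map_congr_left this, ih]
      exact List.flatMap_def .. |>.symm ▸ rfl

-- core identity at the Nat level
lemma core_eq (l : List Int) (hl : l ≠ []) (Q R : Nat) (hQ : 0 < Q) (hR : R < l.length) :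
    (List.range (Q * l.length + R)).map (fun k => l.getD (min (k / Q) (l.length - 1)) 0)
      = l.flatMap (fun x => List.replicate Q x) ++ List.replicate R (l.getLast hl) := by
  rw [List.range_add, List.map_append]
  congr 1
  · have h1 : ∀ k ∈ List.range (Q * l.length),
        l.getD (min (k / Q) (l.length - 1)) 0 = l.getD (k / Q) 0 := by
      intro k hk
      rw [List.mem_range] at hk
      have : k / Q < l.length := (Nat.div_lt_iff_lt_mul hQ).2 (Nat.mul_comm Q l.length ▸ hk)
      rw [Nat.min_eq_left (by omega)]
    rw [List.map_congr_left h1, blocks_eq]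
  · have h2 : ∀ k ∈ List.range R,
        ((fun k => l.getD (min (k / Q) (l.length - 1)) 0) ∘ (fun a => Q * l.length + a)) k
          = l.getLast hl := by
      intro k hk
      simp only [Function.comp]
      have hd : (Q * l.length + k) / Q = l.length + k / Q := by
        rw [Nat.mul_comm Q l.length, Nat.add_comm, Nat.add_mul_div_right _ _ hQ, Nat.add_comm]
      rw [hd, Nat.min_eq_right (Nat.le_trans (Nat.sub_le _ _) (Nat.le_add_right _ _)),
        List.getLast_eq_getElem]
      exact List.getD_eq_getElem l 0 (by omega)
    rw [List.map_map, List.map_congr_left h2]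
    simp [List.map_const']

-- ===== VERDICT (by name: the statement is the Claim_ definition above) =====
theorem duplicate_frames_spec : Claim_equal_duplicate_frames := by
  intro frames target_fps _ hpre
  unfold Spec_duplicate_frames duplicate_frames duplicate_frames_alt
  by_cases hge : (frames.length : Int) ≥ target_fps
  · simp [hge]
  · simp only [hge, if_false]
    -- frames is nonempty, target_fps > length > 0
    have hne : frames ≠ [] := by
      rcases hpre with h | h
      · exact h
      · intro h0; rw [h0] at hge; simp at hge; omega
    have hn : 0 < frames.length := List.length_pos_iff.2 hne
    have ht : (frames.length : Int) < target_fps := by omega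
    have htpos : 0 < target_fps := by
      have : (0:Int) ≤ frames.length := by positivity
      omega
    -- Nat quotient/remainder
    set n := frames.length with hn_def
    have htn : target_fps = (target_fps.toNat : Int) := by omega
    set Q := target_fps.toNat / n with hQ_def
    set R := target_fps.toNat % n with hR_def
    have hq : PySem.Int.floordiv target_fps (n : Int) = (Q : Int) := by
      rw [htn]; exact_mod_cast PySem.Int.floordiv_natCast target_fps.toNat n
    have hr : PySem.Int.mod target_fps (n : Int) = (R : Int) := by
      rw [htn]; exact_mod_cast PySem.Int.mod_natCast target_fps.toNat n
    have hQpos : 0 < Q := Nat.div_pos (by omega) hn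
    have hRlt : R < n := Nat.mod_lt _ hn
    have htQR : target_fps.toNat = Q * n + R := by
      rw [hQ_def, hR_def, Nat.mul_comm]
      exact (Nat.div_add_mod _ _).symm
    simp only [hq, hr]
    -- A side: folds → flatMap ++ replicate
    have hAinner : ∀ (acc : List Int) (img : Int),
        (PySem.List.pyRange 0 (Q : Int) 1).foldl (fun a _ => a ++ [img]) acc
          = acc ++ List.replicate Q img := by
      intro acc img
      rw [PySem.List.foldl_append_singleton_eq_map (f := fun _ => img)]
      rw [List.map_const', PySem.List.length_pyRange_one]
      simp
    have hA1 : frames.foldl (fun acc img =>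
        (PySem.List.pyRange 0 (Q : Int) 1).foldl (fun a _ => a ++ [img]) acc) []
          = frames.flatMap (fun x => List.replicate Q x) := by
      have gen : ∀ (l acc : List Int),
          l.foldl (fun a img =>
            (PySem.List.pyRange 0 (Q : Int) 1).foldl (fun b _ => b ++ [img]) a) acc
            = acc ++ l.flatMap (fun x => List.replicate Q x) := by
        intro l
        induction l with
        | nil => intro acc; simp
        | cons x xs ih =>
          intro acc
          simp only [List.foldl_cons, List.flatMap_cons]
          rw [hAinner, ih, List.append_assoc]
      simpa using gen frames []
    have hlast : PySem.List.pyGetD frames (-1) 0 = frames.getLast hne :=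
      PySem.List.pyGetD_neg_one frames 0 hne
    have hA2 : ∀ (acc : List Int),
        (PySem.List.pyRange 0 (R : Int) 1).foldl
          (fun a _ => a ++ [PySem.List.pyGetD frames (-1) 0]) acc
          = acc ++ List.replicate R (frames.getLast hne) := by
      intro acc
      rw [PySem.List.foldl_append_singleton_eq_map (f := fun _ => PySem.List.pyGetD frames (-1) 0)]
      rw [List.map_const', PySem.List.length_pyRange_one, hlast]
      simp
    rw [hA1, hA2]
    -- B side: comprehension over pyRange → map over List.range
    rw [PySem.List.pyRange_one 0 target_fps]
    rw [List.map_map]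
    have hBfun : ∀ k ∈ List.range (target_fps - 0).toNat,
        ((fun i => PySem.List.pyGetD frames
            (min (PySem.Int.floordiv i ((Q : Nat) : Int)) ((n : Int) - 1)) 0)
          ∘ (fun k : Nat => (0 : Int) + (k : Int))) k
          = frames.getD (min (k / Q) (n - 1)) 0 := by
      intro k hk
      simp only [Function.comp, zero_add]
      have h1 : PySem.Int.floordiv ((k : Nat) : Int) ((Q : Nat) : Int) = ((k / Q : Nat) : Int) :=
        PySem.Int.floordiv_natCast k Q
      have h2 : ((n : Nat) : Int) - 1 = ((n - 1 : Nat) : Int) := by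
        push_cast [Nat.cast_sub hn]; ring
      rw [h1, h2, ← Nat.cast_min, PySem.List.pyGetD_natCast]
    rw [List.map_congr_left hBfun]
    have hrange : (target_fps - 0).toNat = Q * n + R := by
      simpa using htQR
    rw [hrange]
    exact (core_eq frames hne Q R hQpos hRlt).symm
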